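-- pv_equiv track=rewrite | github.com/StewartalsopIII/dropbox_monitor | processing/transcriber.py | _extract_speakers
-- ===== SOURCE A (Python) =====
-- from typing import Optional, List
--
-- def _extract_speakers(transcription: str) -> List[str]:
--     """Extract speaker names from transcription for context in next chunk."""
--     speakers = set()
--     for line in transcription.split('\n'):
--         if ':' in line:
--             speaker = line.split(':', 1)[0].strip()
--             if speaker:
--                 speakers.add(speaker)
--     return list(speakers)
-- ===== SOURCE B (Python) =====
-- from typing import List
--
-- def _extract_speakers(transcription: str) -> List[str]:
--     """Single character-level pass: a small state machine tracks the current
--     line prefix and whether a colon was already seen on this line."""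
--     speakers = set()
--     buf = []
--     seen_colon = False
--     for ch in transcription + '\n':
--         if ch == '\n':
--             buf.clear()
--             seen_colon = False
--         elif ch == ':' and not seen_colon:
--             name = ''.join(buf).strip()
--             if name:
--                 speakers.add(name)
--             seen_colon = True
--         elif not seen_colon:
--             buf.append(ch)
--     return list(speakers)
-- ===== Notes on version B (the rewrite author's own statement) =====
-- stated objective: alternative
-- what changed: A splits the text into lines and re-splits each line at the first colon; B makes one character-level pass with a small state machine (current line buffer plus a colon-seen flag) and never materialises the line list or calls split.
import Mathlib
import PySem

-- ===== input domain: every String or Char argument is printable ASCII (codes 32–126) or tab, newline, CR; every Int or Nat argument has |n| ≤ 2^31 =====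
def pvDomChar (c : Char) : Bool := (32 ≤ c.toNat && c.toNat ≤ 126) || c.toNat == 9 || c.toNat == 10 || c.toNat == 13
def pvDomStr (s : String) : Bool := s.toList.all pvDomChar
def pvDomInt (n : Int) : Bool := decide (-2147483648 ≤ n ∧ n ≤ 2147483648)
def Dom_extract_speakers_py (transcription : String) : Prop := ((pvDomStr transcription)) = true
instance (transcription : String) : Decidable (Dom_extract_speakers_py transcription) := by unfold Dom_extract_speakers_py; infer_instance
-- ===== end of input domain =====

-- B replaces A's split-into-lines-then-split-each-line loop by one character-level
-- state machine over the text (objective: alternative single pass; return value only,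
-- neither program mutates its argument).

-- ===== PORT A =====
-- per-line body of A's loop (speaker strings handled as List Char; String.ofList applied at the end)
def pvAline (speakers : PySem.Set (List Char)) (line : List Char) : PySem.Set (List Char) :=
  if PySem.Chars.isIn [':'] line then
    -- speaker = line.split(':', 1)[0].strip()   (index 0 always exists: the split list is nonempty)
    let speaker := PySem.Chars.strip ((PySem.List.pyGet? (PySem.Chars.splitOnMax line [':'] 1) 0).getD [])
    if speaker ≠ [] then PySem.Set.add speakers speaker else speakers
  else speakers

def extract_speakers_py (transcription : String) : List String :=
  (((PySem.Chars.split? transcription.toList ['\n']).getD []).foldl pvAline PySem.Set.empty).map String.ofList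

-- ===== PORT B =====
-- one step of B's state machine: state = (speakers, current line buffer, colon already seen)
def pvBstep (st : PySem.Set (List Char) × List Char × Bool) (c : Char) :
    PySem.Set (List Char) × List Char × Bool :=
  if c = '\n' then (st.1, [], false)
  else if c = ':' ∧ st.2.2 = false then
    (let name := PySem.Chars.strip st.2.1
     if name ≠ [] then PySem.Set.add st.1 name else st.1, st.2.1, true)
  else if st.2.2 = false then (st.1, st.2.1 ++ [c], false)
  else st

def extract_speakers_py_alt (transcription : String) : List String :=
  (((transcription.toList ++ ['\n']).foldl pvBstep (PySem.Set.empty, [], false)).1).map String.ofList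

-- ===== PRECONDITION & SPEC =====
def Spec_extract_speakers_py (transcription : String) (out : List String) : Prop := out = extract_speakers_py_alt transcription
instance (transcription : String) (out : List String) : Decidable (Spec_extract_speakers_py transcription out) := by unfold Spec_extract_speakers_py; infer_instance

-- ===== CLAIM (what is proved, stated in full; the proofs are below) =====
def Claim_equal_extract_speakers_py : Prop := ∀ (transcription : String), Dom_extract_speakers_py transcription → Spec_extract_speakers_py transcription (extract_speakers_py transcription)

-- ===== LEMMAS AND PROOFS =====

-- structural version of splitting on '\n'
def pvSplitNl : List Char → List (List Char)
  | [] => [[]]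
  | c :: rest =>
    if c = '\n' then [] :: pvSplitNl rest
    else match pvSplitNl rest with
      | [] => [[c]]
      | p :: ps => (c :: p) :: ps

def pvHeadCons (b : List Char) : List (List Char) → List (List Char)
  | [] => [b]
  | p :: ps => (b ++ p) :: ps

theorem pvSplitNl_ne_nil (cs : List Char) : pvSplitNl cs ≠ [] := by
  cases cs with
  | nil => simp [pvSplitNl]
  | cons c rest =>
    simp only [pvSplitNl]
    split
    · simp
    · split <;> simp

theorem pvHeadCons_nil_of_ne (l : List (List Char)) (h : l ≠ []) : pvHeadCons [] l = l := by
  cases l with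
  | nil => exact absurd rfl h
  | cons p ps => simp [pvHeadCons]

theorem pv_go_eq (fuel : Nat) : ∀ (l cur : List Char) (acc : List (List Char)), l.length ≤ fuel →
    PySem.Chars.splitOn.go ['\n'] fuel l cur acc
      = acc.reverse ++ pvHeadCons cur.reverse (pvSplitNl l) := by
  induction fuel with
  | zero =>
    intro l cur acc hl
    have : l = [] := List.eq_nil_of_length_eq_zero (Nat.le_zero.mp hl)
    subst this
    rw [PySem.Chars.splitOn.go.eq_def]
    simp [pvSplitNl, pvHeadCons]
  | succ fuel ih =>
    intro l cur acc hl
    cases l with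
    | nil =>
      rw [PySem.Chars.splitOn.go.eq_def]
      simp [pvSplitNl, pvHeadCons]
    | cons c rest =>
      by_cases hc : c = '\n'
      · subst hc
        have hpre : (['\n'] : List Char).isPrefixOf ('\n' :: rest) = true := by simp [List.isPrefixOf]
        rw [PySem.Chars.splitOn.go.eq_def]
        simp only [hpre, if_true]
        simp only [List.length_cons] at hl
        simp only [List.length_singleton, List.drop_succ_cons, List.drop_zero]
        rw [ih _ _ _ (Nat.le_of_succ_le_succ hl)]
        simp only [pvSplitNl, if_pos rfl, pvHeadCons, List.nil_append]
        rcases hne : pvSplitNl rest with _ | ⟨p, ps⟩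
        · exact absurd hne (pvSplitNl_ne_nil rest)
        · simp
      · have hpre : (['\n'] : List Char).isPrefixOf (c :: rest) = false := by
          simp [List.isPrefixOf]
          exact fun h => hc h.symm
        rw [PySem.Chars.splitOn.go.eq_def]
        simp only [hpre, Bool.false_eq_true, if_false]
        simp only [List.length_cons] at hl
        rw [ih _ _ _ (Nat.le_of_succ_le_succ hl)]
        rcases hne : pvSplitNl rest with _ | ⟨p, ps⟩
        · exact absurd hne (pvSplitNl_ne_nil rest)
        · simp [pvSplitNl, hc, hne, pvHeadCons]

theorem pv_splitOn_eq (cs : List Char) :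
    PySem.Chars.splitOn cs ['\n'] = pvSplitNl cs := by
  unfold PySem.Chars.splitOn
  rw [pv_go_eq (cs.length + 1) cs [] [] (Nat.le_succ _)]
  simp [pvHeadCons_nil_of_ne _ (pvSplitNl_ne_nil cs)]

theorem pv_goMax_ne (fuel : Nat) : ∀ (m : Nat) (l cur : List Char) (acc : List (List Char)),
    ∃ u, u ≠ [] ∧ PySem.Chars.splitOnMax.go [':'] fuel m l cur acc = acc.reverse ++ u := by
  induction fuel with
  | zero =>
    intro m l cur acc
    exact ⟨[cur.reverse ++ l], by simp, by rw [PySem.Chars.splitOnMax.go.eq_def]; simp⟩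
  | succ fuel ih =>
    intro m l cur acc
    cases l with
    | nil => exact ⟨[cur.reverse], by simp, by rw [PySem.Chars.splitOnMax.go.eq_def]; simp⟩
    | cons c rest =>
      by_cases hm : m = 0
      · subst hm
        exact ⟨[cur.reverse ++ c :: rest], by simp, by rw [PySem.Chars.splitOnMax.go.eq_def]; simp⟩
      · by_cases hc : c = ':'
        · subst hc
          have hpre : ([':'] : List Char).isPrefixOf (':' :: rest) = true := by simp [List.isPrefixOf]
          obtain ⟨u, hu, hgo⟩ := ih (m - 1) rest [] (cur.reverse :: acc)
          refine ⟨cur.reverse :: u, by simp, ?_⟩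
          rw [PySem.Chars.splitOnMax.go.eq_def]
          simp only [hm, if_false, hpre, if_true, List.length_singleton, List.drop_succ_cons,
            List.drop_zero]
          simpa using hgo
        · have hpre : ([':'] : List Char).isPrefixOf (c :: rest) = false := by
            simp [List.isPrefixOf]
            exact fun h => hc h.symm
          obtain ⟨u, hu, hgo⟩ := ih m rest (c :: cur) acc
          refine ⟨u, hu, ?_⟩
          rw [PySem.Chars.splitOnMax.go.eq_def]
          simp only [hm, if_false, hpre, Bool.false_eq_true]
          exact hgo

theorem pv_goMax_head (fuel : Nat) : ∀ (m : Nat) (l cur : List Char) (acc : List (List Char)),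
    l.length ≤ fuel →
    ∃ t, PySem.Chars.splitOnMax.go [':'] fuel (m + 1) l cur acc
      = acc.reverse ++ (cur.reverse ++ l.takeWhile (fun c => c != ':')) :: t := by
  induction fuel with
  | zero =>
    intro m l cur acc hl
    have : l = [] := List.eq_nil_of_length_eq_zero (Nat.le_zero.mp hl)
    subst this
    exact ⟨[], by rw [PySem.Chars.splitOnMax.go.eq_def]; simp [List.takeWhile]⟩
  | succ fuel ih =>
    intro m l cur acc hl
    cases l with
    | nil => exact ⟨[], by rw [PySem.Chars.splitOnMax.go.eq_def]; simp [List.takeWhile]⟩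
    | cons c rest =>
      simp only [List.length_cons] at hl
      by_cases hc : c = ':'
      · subst hc
        have hpre : ([':'] : List Char).isPrefixOf (':' :: rest) = true := by simp [List.isPrefixOf]
        obtain ⟨u, hu, hgo⟩ := pv_goMax_ne fuel m rest [] (cur.reverse :: acc)
        refine ⟨u, ?_⟩
        rw [PySem.Chars.splitOnMax.go.eq_def]
        simp only [Nat.succ_ne_zero, if_false, hpre, if_true, Nat.add_sub_cancel,
          List.length_singleton, List.drop_succ_cons, List.drop_zero]
        rw [hgo]
        simp [List.takeWhile]
      · have hpre : ([':'] : List Char).isPrefixOf (c :: rest) = false := by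
          simp [List.isPrefixOf]
          exact fun h => hc h.symm
        obtain ⟨t, hgo⟩ := ih m rest (c :: cur) acc (Nat.le_of_succ_le_succ hl)
        have hbne : (c != ':') = true := by simp [hc]
        refine ⟨t, ?_⟩
        rw [PySem.Chars.splitOnMax.go.eq_def]
        simp only [Nat.succ_ne_zero, if_false, hpre, Bool.false_eq_true]
        rw [hgo]
        simp [List.takeWhile, hbne]

theorem pv_splitOnMax_head (l : List Char) :
    (PySem.List.pyGet? (PySem.Chars.splitOnMax l [':'] 1) 0).getD []
      = l.takeWhile (fun c => c != ':') := by
  unfold PySem.Chars.splitOnMax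
  rw [if_neg (by norm_num)]
  obtain ⟨t, hgo⟩ := pv_goMax_head (l.length + 1) 0 l [] [] (Nat.le_succ _)
  norm_num at hgo
  simp only [Int.toNat_one]
  rw [hgo]
  simp [PySem.List.pyGet?, PySem.List.pyIdx?]

theorem pv_isIn_iff (l : List Char) : PySem.Chars.isIn [':'] l = true ↔ ':' ∈ l := by
  rw [PySem.Chars.isIn_iff_infix]
  constructor
  · rintro ⟨s, t, rfl⟩; simp
  · intro h
    obtain ⟨s, t, rfl⟩ := List.append_of_mem h
    exact ⟨s, t, by simp⟩

theorem pv_takeWhile_colon (buf p : List Char) (h : ':' ∉ buf) :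
    (buf ++ ':' :: p).takeWhile (fun c => c != ':') = buf := by
  induction buf with
  | nil => simp [List.takeWhile]
  | cons b bs ih =>
    have hb : b ≠ ':' := fun he => h (by simp [he])
    simp only [List.cons_append, List.takeWhile_cons, bne_iff_ne, ne_eq, hb,
      not_false_eq_true, ite_true, if_pos]
    rw [ih (fun hm => h (List.mem_cons_of_mem _ hm))]

theorem pvAline_nocolon (sp : PySem.Set (List Char)) (l : List Char) (h : ':' ∉ l) :
    pvAline sp l = sp := by
  unfold pvAline
  rw [if_neg]
  intro hin
  exact h ((pv_isIn_iff l).mp hin)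

theorem pvAline_colon (sp : PySem.Set (List Char)) (buf p : List Char) (h : ':' ∉ buf) :
    pvAline sp (buf ++ ':' :: p)
      = (if PySem.Chars.strip buf ≠ [] then PySem.Set.add sp (PySem.Chars.strip buf) else sp) := by
  unfold pvAline
  rw [if_pos ((pv_isIn_iff _).mpr (by simp))]
  rw [pv_splitOnMax_head, pv_takeWhile_colon _ _ h]

theorem pv_main (cs : List Char) :
    (∀ (sp : PySem.Set (List Char)) (buf : List Char), ':' ∉ buf →
      List.foldl pvBstep (sp, buf, false) (cs ++ ['\n'])
        = (List.foldl pvAline sp (pvHeadCons buf (pvSplitNl cs)), [], false))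
    ∧ (∀ (sp : PySem.Set (List Char)) (buf : List Char),
      List.foldl pvBstep (sp, buf, true) (cs ++ ['\n'])
        = (List.foldl pvAline sp ((pvSplitNl cs).tail), [], false)) := by
  induction cs with
  | nil =>
    constructor
    · intro sp buf h
      simp [pvBstep, pvSplitNl, pvHeadCons, pvAline_nocolon sp buf h]
    · intro sp buf
      simp [pvBstep, pvSplitNl]
  | cons c cs ih =>
    rcases hne : pvSplitNl cs with _ | ⟨p, ps⟩
    · exact absurd hne (pvSplitNl_ne_nil cs)
    constructor
    · intro sp buf h
      by_cases hc : c = '\n'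
      · subst hc
        simp only [List.cons_append, List.foldl_cons]
        have hstep : pvBstep (sp, buf, false) '\n' = (sp, [], false) := by simp [pvBstep]
        rw [hstep, (ih.1 sp [] (by simp))]
        rw [pvHeadCons_nil_of_ne (pvSplitNl cs) (pvSplitNl_ne_nil cs)]
        simp [pvSplitNl, pvHeadCons, hne, pvAline_nocolon sp buf h]
      · by_cases hcol : c = ':'
        · subst hcol
          simp only [List.cons_append, List.foldl_cons]
          have hstep : pvBstep (sp, buf, false) ':'
              = ((if PySem.Chars.strip buf ≠ [] then PySem.Set.add sp (PySem.Chars.strip buf) else sp),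
                 buf, true) := by
            simp [pvBstep]
          rw [hstep, ih.2]
          simp only [pvSplitNl, hc, ite_false, hne, pvHeadCons, List.foldl_cons, List.tail_cons,
            if_neg hc]
          rw [pvAline_colon sp buf p h]
        · simp only [List.cons_append, List.foldl_cons]
          have hstep : pvBstep (sp, buf, false) c = (sp, buf ++ [c], false) := by
            simp [pvBstep, hc, hcol]
          have hbc : ':' ∉ buf ++ [c] := by
            intro hm
            rcases List.mem_append.mp hm with hm | hm
            · exact h hm
            · exact hcol (List.mem_singleton.mp hm).symm
          rw [hstep, ih.1 sp (buf ++ [c]) hbc]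
          simp only [pvSplitNl, hc, ite_false, hne, pvHeadCons, if_neg hc]
          simp [List.append_assoc]
    · intro sp buf
      by_cases hc : c = '\n'
      · subst hc
        simp only [List.cons_append, List.foldl_cons]
        have hstep : pvBstep (sp, buf, true) '\n' = (sp, [], false) := by simp [pvBstep]
        rw [hstep, ih.1 sp [] (by simp)]
        simp [pvSplitNl, pvHeadCons_nil_of_ne _ (pvSplitNl_ne_nil cs)]
      · simp only [List.cons_append, List.foldl_cons]
        have hstep : pvBstep (sp, buf, true) c = (sp, buf, true) := by
          simp [pvBstep, hc]
        rw [hstep, ih.2 sp buf]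
        simp [pvSplitNl, hc, hne, if_neg hc]

-- ===== VERDICT (by name: the statement is the Claim_ definition above) =====
theorem extract_speakers_py_spec : Claim_equal_extract_speakers_py := by
  unfold Claim_equal_extract_speakers_py
  intro t _
  unfold Spec_extract_speakers_py extract_speakers_py extract_speakers_py_alt
  rw [(pv_main t.toList).1 PySem.Set.empty [] (by simp)]
  simp only [PySem.Chars.split?, List.isEmpty_cons]
  rw [pv_splitOn_eq, pvHeadCons_nil_of_ne _ (pvSplitNl_ne_nil t.toList)]
  simp
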